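-- pv_equiv track=rewrite | github.com/Brawek/sprawdzian_nierodka | 3.py | wyznacz_skrot
-- ===== SOURCE A (Python) =====
-- def wyznacz_skrot(n):
--     m = 0
--     waga = 1
--     temp_n = n
--     while temp_n > 0:
--         cyfra = temp_n % 10
--         if cyfra % 2 != 0:
--             m = cyfra * waga + m
--             waga = waga * 10
--         temp_n = temp_n // 10
--
--     if m == 0 and waga == 1:
--         return None
--     return m
-- ===== SOURCE B (Python) =====
-- def wyznacz_skrot(n):
--     if n <= 0:
--         return None
--     prefix = wyznacz_skrot(n // 10)
--     d = n % 10
--     if d % 2 == 0: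
--         return prefix
--     return (0 if prefix is None else prefix) * 10 + d
-- ===== Notes on version B (the rewrite author's own statement) =====
-- stated objective: alternative
-- what changed: Replaces A's while loop with its accumulator and growing place-value weight (and its sentinel test on the final accumulator/weight pair) by a most-significant-digit-first recursion that appends each odd digit to the recursively built prefix and propagates the no-odd-digit case as None.
import Mathlib
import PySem

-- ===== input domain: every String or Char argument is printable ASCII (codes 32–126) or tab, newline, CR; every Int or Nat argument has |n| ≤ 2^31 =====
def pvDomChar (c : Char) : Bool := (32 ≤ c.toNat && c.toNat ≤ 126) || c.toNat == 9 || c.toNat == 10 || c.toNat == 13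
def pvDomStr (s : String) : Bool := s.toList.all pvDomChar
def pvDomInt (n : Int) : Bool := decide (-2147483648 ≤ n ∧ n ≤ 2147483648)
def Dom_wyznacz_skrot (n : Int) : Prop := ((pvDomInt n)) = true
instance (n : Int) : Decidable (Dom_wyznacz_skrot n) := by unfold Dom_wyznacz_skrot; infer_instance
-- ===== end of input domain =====

-- B replaces A's while loop with its accumulator m and place-value weight waga by a
-- most-significant-digit-first recursion that propagates None via Option (objective: alternative).

-- termination helper, cited by both ports' decreasing_by
theorem pv_div10_toNat_lt (t : Int) (ht : 0 < t) :
    (PySem.Int.floordiv t 10).toNat < t.toNat := by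
  rw [PySem.Int.floordiv_eq_ediv_of_pos (by norm_num)]
  have h2 : 0 ≤ t / 10 := Int.ediv_nonneg (le_of_lt ht) (by norm_num)
  have h3 : t / 10 * 10 ≤ t := Int.ediv_mul_le t (by norm_num)
  omega

-- ===== PORT A =====
def wyznaczLoop (temp_n m waga : Int) : Int × Int :=
  if h : temp_n > 0 then
    let cyfra := PySem.Int.mod temp_n 10
    if PySem.Int.mod cyfra 2 ≠ 0 then
      wyznaczLoop (PySem.Int.floordiv temp_n 10) (cyfra * waga + m) (waga * 10)
    else
      wyznaczLoop (PySem.Int.floordiv temp_n 10) m waga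
  else (m, waga)
termination_by temp_n.toNat
decreasing_by all_goals exact pv_div10_toNat_lt temp_n h

def wyznacz_skrot (n : Int) : Option Int :=
  let r := wyznaczLoop n 0 1
  if r.1 = 0 ∧ r.2 = 1 then none else some r.1

-- ===== PORT B =====
def wyznacz_skrot_alt (n : Int) : Option Int :=
  if h : n ≤ 0 then none
  else
    let pfx := wyznacz_skrot_alt (PySem.Int.floordiv n 10)
    let d := PySem.Int.mod n 10
    if PySem.Int.mod d 2 = 0 then pfx
    else some ((pfx.getD 0) * 10 + d)
termination_by n.toNat
decreasing_by exact pv_div10_toNat_lt n (by omega)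

-- ===== PRECONDITION & SPEC =====
def Spec_wyznacz_skrot (n : Int) (out : Option Int) : Prop := out = wyznacz_skrot_alt n
instance (n : Int) (out : Option Int) : Decidable (Spec_wyznacz_skrot n out) := by unfold Spec_wyznacz_skrot; infer_instance

-- ===== CLAIM (what is proved, stated in full; the proofs are below) =====
def Claim_equal_wyznacz_skrot : Prop := ∀ (n : Int), Dom_wyznacz_skrot n → Spec_wyznacz_skrot n (wyznacz_skrot n)

-- ===== LEMMAS AND PROOFS =====

-- value of the odd digits of n, read in order (0 if there are none)
def pvOddVal (n : Int) : Int :=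
  if h : n ≤ 0 then 0
  else
    let r := pvOddVal (PySem.Int.floordiv n 10)
    let d := PySem.Int.mod n 10
    if PySem.Int.mod d 2 = 0 then r else r * 10 + d
termination_by n.toNat
decreasing_by exact pv_div10_toNat_lt n (by omega)

-- number of odd digits of n
def pvOddCnt (n : Int) : Nat :=
  if h : n ≤ 0 then 0
  else
    let r := pvOddCnt (PySem.Int.floordiv n 10)
    let d := PySem.Int.mod n 10
    if PySem.Int.mod d 2 = 0 then r else r + 1
termination_by n.toNat
decreasing_by exact pv_div10_toNat_lt n (by omega)

theorem pvOddVal_of_cnt_zero : ∀ (N : Nat) (n : Int), n.toNat ≤ N →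
    pvOddCnt n = 0 → pvOddVal n = 0 := by
  intro N
  induction N with
  | zero =>
    intro n hn _
    rw [pvOddVal]
    simp only [show n ≤ 0 by omega, dite_true]
  | succ N ih =>
    intro n hn hc
    by_cases hle : n ≤ 0
    · rw [pvOddVal]; simp only [hle, dite_true]
    · rw [pvOddCnt] at hc
      rw [pvOddVal]
      simp only [hle, dite_false] at hc ⊢
      by_cases he : PySem.Int.mod (PySem.Int.mod n 10) 2 = 0
      · simp only [he, if_true] at hc ⊢
        exact ih (PySem.Int.floordiv n 10)
          (by have := pv_div10_toNat_lt n (by omega); omega) hc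
      · rw [if_neg he] at hc
        exact absurd hc (Nat.succ_ne_zero _)

theorem pv_loop_eq : ∀ (N : Nat) (t : Int), t.toNat ≤ N → ∀ (m w : Int),
    wyznaczLoop t m w = (pvOddVal t * w + m, w * 10 ^ pvOddCnt t) := by
  intro N
  induction N with
  | zero =>
    intro t ht m w
    rw [wyznaczLoop, pvOddVal, pvOddCnt]
    simp only [show ¬ t > 0 by omega, dite_false, show t ≤ 0 by omega, dite_true]
    simp
  | succ N ih =>
    intro t ht m w
    by_cases hpos : t > 0
    · have hrec := ih (PySem.Int.floordiv t 10)
        (by have := pv_div10_toNat_lt t hpos; omega)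
      rw [wyznaczLoop, pvOddVal, pvOddCnt]
      simp only [hpos, dite_true, show ¬ t ≤ 0 by omega, dite_false, ne_eq, ite_not]
      by_cases he : PySem.Int.mod (PySem.Int.mod t 10) 2 = 0
      · simp only [he, if_true]
        exact hrec m w
      · simp only [he, if_false]
        rw [hrec]
        simp only [Prod.mk.injEq]
        refine ⟨by ring, by rw [pow_succ]; ring⟩
    · rw [wyznaczLoop, pvOddVal, pvOddCnt]
      simp only [hpos, dite_false, show t ≤ 0 by omega, dite_true]
      simp

theorem pv_alt_eq : ∀ (N : Nat) (n : Int), n.toNat ≤ N →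
    wyznacz_skrot_alt n = if pvOddCnt n = 0 then none else some (pvOddVal n) := by
  intro N
  induction N with
  | zero =>
    intro n hn
    rw [wyznacz_skrot_alt, pvOddCnt]
    simp only [show n ≤ 0 by omega, dite_true, if_true]
  | succ N ih =>
    intro n hn
    by_cases hle : n ≤ 0
    · rw [wyznacz_skrot_alt, pvOddCnt]
      simp only [hle, dite_true, if_true]
    · have hlt := pv_div10_toNat_lt n (by omega)
      have hrec := ih (PySem.Int.floordiv n 10) (by omega)
      rw [wyznacz_skrot_alt, pvOddVal, pvOddCnt]
      simp only [hle, dite_false]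
      by_cases he : PySem.Int.mod (PySem.Int.mod n 10) 2 = 0
      · simp only [he, if_true]
        exact hrec
      · simp only [he, if_false]
        rw [hrec]
        by_cases hc : pvOddCnt (PySem.Int.floordiv n 10) = 0
        · have hv := pvOddVal_of_cnt_zero N (PySem.Int.floordiv n 10) (by omega) hc
          simp only [hc, if_true, hv, Option.getD_none]
          simp
        · simp only [hc, if_false, Option.getD_some]
          simp

-- ===== VERDICT (by name: the statement is the Claim_ definition above) =====
theorem wyznacz_skrot_spec : Claim_equal_wyznacz_skrot := by
  intro n _
  unfold Spec_wyznacz_skrot wyznacz_skrot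
  rw [pv_loop_eq n.toNat n le_rfl 0 1, pv_alt_eq n.toNat n le_rfl]
  by_cases hc : pvOddCnt n = 0
  · have hv := pvOddVal_of_cnt_zero n.toNat n le_rfl hc
    simp [hc, hv]
  · have h1 : (10:Int) ^ pvOddCnt n ≠ 1 := by
      have : (10:Int) ^ 1 ≤ 10 ^ pvOddCnt n := by
        apply pow_le_pow_right₀ (by norm_num) (by omega)
      simp at this; omega
    simp [hc, h1]
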